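-- pv_equiv track=rewrite | github.com/joseph-karim/techscaniq-mvp | techscaniq-v2/backend/services/serena_tools.py | _detect_architecture_patterns
-- ===== SOURCE A (Python) =====
-- from typing import Dict, List, Any, Optional, Literal
--
-- def _detect_architecture_patterns(symbols: List[Dict[str, Any]]) -> List[str]:
--     """Detect common architecture patterns"""
--     patterns = []
--
--     # Check for MVC pattern
--     has_controllers = any('Controller' in s.get('name', '') for s in symbols)
--     has_models = any('Model' in s.get('name', '') for s in symbols)
--     has_views = any('View' in s.get('name', '') for s in symbols)
--
--     if has_controllers and has_models:
--         patterns.append("MVC")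
--
--     # Check for service pattern
--     has_services = any('Service' in s.get('name', '') for s in symbols)
--     if has_services:
--         patterns.append("Service Layer")
--
--     # Check for repository pattern
--     has_repos = any('Repository' in s.get('name', '') for s in symbols)
--     if has_repos:
--         patterns.append("Repository Pattern")
--
--     return patterns
-- ===== SOURCE B (Python) =====
-- from typing import Dict, List, Any
--
-- def _detect_architecture_patterns(symbols: List[Dict[str, Any]]) -> List[str]:
--     """Detect common architecture patterns (single pass over symbols)."""
--     has_controllers = has_models = has_services = has_repos = False
--     for s in symbols:
--         name = s.get('name', '')
--         if 'Controller' in name: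
--             has_controllers = True
--         if 'Model' in name:
--             has_models = True
--         if 'Service' in name:
--             has_services = True
--         if 'Repository' in name:
--             has_repos = True
--     patterns = []
--     if has_controllers and has_models:
--         patterns.append("MVC")
--     if has_services:
--         patterns.append("Service Layer")
--     if has_repos:
--         patterns.append("Repository Pattern")
--     return patterns
-- ===== Notes on version B (the rewrite author's own statement) =====
-- stated objective: simpler
-- what changed: Replaces A's five separate any(...) generator scans over symbols with one loop that updates four boolean flags per symbol, drops the computed-but-unused has_views check, and builds the pattern list from the flags afterwards.
import Mathlib
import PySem

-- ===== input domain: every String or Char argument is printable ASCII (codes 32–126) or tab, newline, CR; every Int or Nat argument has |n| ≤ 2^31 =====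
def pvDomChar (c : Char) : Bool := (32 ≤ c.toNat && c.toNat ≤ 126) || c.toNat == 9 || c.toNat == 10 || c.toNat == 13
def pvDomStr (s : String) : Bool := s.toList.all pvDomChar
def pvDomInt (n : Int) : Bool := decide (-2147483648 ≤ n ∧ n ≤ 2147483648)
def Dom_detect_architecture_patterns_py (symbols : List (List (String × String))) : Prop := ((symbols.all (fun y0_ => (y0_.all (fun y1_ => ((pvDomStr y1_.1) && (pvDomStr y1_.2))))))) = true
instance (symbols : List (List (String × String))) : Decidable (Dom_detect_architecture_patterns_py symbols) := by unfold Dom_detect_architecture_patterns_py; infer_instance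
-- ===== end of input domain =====

-- B merges A's five separate any(...) scans into one pass maintaining four flags (objective: simpler).

-- s.get('name', '') on the association-list dict
def pvName (s : List (String × String)) : String := (PySem.Dict.mk s).getD "name" ""

-- ===== PORT A =====
def detect_architecture_patterns_py (symbols : List (List (String × String))) : List String :=
  let patterns : List String := []
  let has_controllers := symbols.any (fun s => PySem.Str.isIn "Controller" (pvName s))
  let has_models := symbols.any (fun s => PySem.Str.isIn "Model" (pvName s))
  let _has_views := symbols.any (fun s => PySem.Str.isIn "View" (pvName s))
  let patterns := if has_controllers && has_models then patterns ++ ["MVC"] else patterns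
  let has_services := symbols.any (fun s => PySem.Str.isIn "Service" (pvName s))
  let patterns := if has_services then patterns ++ ["Service Layer"] else patterns
  let has_repos := symbols.any (fun s => PySem.Str.isIn "Repository" (pvName s))
  let patterns := if has_repos then patterns ++ ["Repository Pattern"] else patterns
  patterns

-- ===== PORT B =====
-- one pass: fold the four flags over symbols
def pvStep (fl : Bool × Bool × Bool × Bool) (s : List (String × String)) :
    Bool × Bool × Bool × Bool :=
  let name := pvName s
  (fl.1 || PySem.Str.isIn "Controller" name,
   fl.2.1 || PySem.Str.isIn "Model" name,
   fl.2.2.1 || PySem.Str.isIn "Service" name,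
   fl.2.2.2 || PySem.Str.isIn "Repository" name)

def detect_architecture_patterns_py_alt (symbols : List (List (String × String))) : List String :=
  let fl := symbols.foldl pvStep (false, false, false, false)
  (if fl.1 && fl.2.1 then ["MVC"] else []) ++
  (if fl.2.2.1 then ["Service Layer"] else []) ++
  (if fl.2.2.2 then ["Repository Pattern"] else [])

-- ===== PRECONDITION & SPEC =====
def Spec_detect_architecture_patterns_py (symbols : List (List (String × String))) (out : List String) : Prop := out = detect_architecture_patterns_py_alt symbols
instance (symbols : List (List (String × String))) (out : List String) : Decidable (Spec_detect_architecture_patterns_py symbols out) := by unfold Spec_detect_architecture_patterns_py; infer_instance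

-- ===== CLAIM (what is proved, stated in full; the proofs are below) =====
def Claim_equal_detect_architecture_patterns_py : Prop := ∀ (symbols : List (List (String × String))), Dom_detect_architecture_patterns_py symbols → Spec_detect_architecture_patterns_py symbols (detect_architecture_patterns_py symbols)

-- ===== LEMMAS AND PROOFS =====

-- the folded flags are exactly the four any-scans (each disjoined with the initial flag)
theorem pv_foldl_flags (symbols : List (List (String × String))) (a b c d : Bool) :
    symbols.foldl pvStep (a, b, c, d) =
      (a || symbols.any (fun s => PySem.Str.isIn "Controller" (pvName s)),
       b || symbols.any (fun s => PySem.Str.isIn "Model" (pvName s)),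
       c || symbols.any (fun s => PySem.Str.isIn "Service" (pvName s)),
       d || symbols.any (fun s => PySem.Str.isIn "Repository" (pvName s))) := by
  induction symbols generalizing a b c d with
  | nil => simp
  | cons x xs ih =>
      simp only [List.foldl_cons, List.any_cons, pvStep, ih, Bool.or_assoc]

theorem detect_architecture_patterns_py_spec : Claim_equal_detect_architecture_patterns_py := by
  intro symbols _
  show detect_architecture_patterns_py symbols = detect_architecture_patterns_py_alt symbols
  simp only [detect_architecture_patterns_py, detect_architecture_patterns_py_alt,
    pv_foldl_flags, Bool.false_or]
  cases symbols.any (fun s => PySem.Str.isIn "Controller" (pvName s)) <;>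
  cases symbols.any (fun s => PySem.Str.isIn "Model" (pvName s)) <;>
  cases symbols.any (fun s => PySem.Str.isIn "Service" (pvName s)) <;>
  cases symbols.any (fun s => PySem.Str.isIn "Repository" (pvName s)) <;> rfl
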